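-- pv_equiv track=rewrite | github.com/efdavies/Ethan-Davies | ps5-efdavies-main/Prob1.py | to_obenglobish
-- ===== SOURCE A (Python) =====
-- def to_obenglobish(word):
--     """ Converts an English word into its Obenglobish equivalent.
--
--     Inputs:
--         word (string): word to be translated to Obenglobish
--     Outputs:
--         (string): the Obenglobish translation of the word
--     """
--     # Add your code below and remove this pass!
--     vowels=["a","e","i","o","u"]
--     new_word=""
--     silent_vowels=["e"]
--     for i in range (0,len(word)):
--         if word[i] not in vowels:
--             new_word+=word[i]
--         elif word[i-1] in vowels and word[i] in vowels and i>0: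
--             new_word+=word[i]
--         elif i+1==len(word) and word[i]==vowels[1]:
--             new_word+=word[i]
--
--         else:
--             new_word+="ob"+word[i]
--
--     return new_word
-- ===== SOURCE B (Python) =====
-- def to_obenglobish(word):
--     """ Converts an English word into its Obenglobish equivalent.
--
--     Scans the word as maximal runs of vowels: 'ob' is inserted before each
--     vowel run, except a run that is exactly a final 'e'.
--     """
--     vowels = "aeiou"
--     pieces = []
--     i = 0
--     n = len(word)
--     while i < n:
--         if word[i] not in vowels:
--             pieces.append(word[i])
--             i += 1
--         else:
--             j = i
--             while j < n and word[j] in vowels: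
--                 j += 1
--             run = word[i:j]
--             if run == "e" and j == n:
--                 pieces.append(run)
--             else:
--                 pieces.append("ob" + run)
--             i = j
--     return "".join(pieces)
-- ===== Notes on version B (the rewrite author's own statement) =====
-- stated objective: alternative
-- what changed: A walks character indices and re-tests word[i-1] at every vowel; B tokenizes the word into maximal vowel runs and prefixes each run with 'ob' unless the run is exactly a trailing 'e', joining the pieces at the end.
import Mathlib
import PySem

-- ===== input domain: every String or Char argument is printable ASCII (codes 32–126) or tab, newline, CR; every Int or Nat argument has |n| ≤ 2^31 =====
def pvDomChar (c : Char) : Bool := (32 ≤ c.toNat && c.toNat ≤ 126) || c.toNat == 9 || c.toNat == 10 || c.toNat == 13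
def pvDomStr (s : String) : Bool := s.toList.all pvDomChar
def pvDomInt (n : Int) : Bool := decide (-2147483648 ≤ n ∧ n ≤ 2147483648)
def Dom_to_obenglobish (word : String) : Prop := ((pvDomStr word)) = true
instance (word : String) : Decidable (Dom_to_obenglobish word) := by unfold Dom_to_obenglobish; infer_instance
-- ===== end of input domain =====

-- B replaces A's per-index loop (with its word[i-1] back-reference) by a tokenizer over
-- maximal vowel runs: 'ob' before each run, except a run that is exactly a final 'e'. (alternative)

-- ===== PORT A =====
def to_obenglobish (word : String) : String :=
  let vowels : List Char := ['a','e','i','o','u']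
  let cs := word.toList
  let new_word : List Char :=
    (PySem.List.pyRange 0 (cs.length : Int) 1).foldl (fun new_word i =>
      if PySem.List.pyGetD cs i ' ' ∉ vowels then
        new_word ++ [PySem.List.pyGetD cs i ' ']
      else if PySem.List.pyGetD cs (i-1) ' ' ∈ vowels ∧ PySem.List.pyGetD cs i ' ' ∈ vowels ∧ i > 0 then
        new_word ++ [PySem.List.pyGetD cs i ' ']
      else if i + 1 = (cs.length : Int) ∧ PySem.List.pyGetD cs i ' ' = 'e' then
        new_word ++ [PySem.List.pyGetD cs i ' ']
      else
        new_word ++ ['o', 'b', PySem.List.pyGetD cs i ' ']) []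
  String.mk new_word

-- ===== PORT B =====
def altVowels : List Char := ['a','e','i','o','u']

def altGo : List Char → List Char
  | [] => []
  | c :: rest =>
    if c ∉ altVowels then c :: altGo rest
    else
      let run := c :: rest.takeWhile (· ∈ altVowels)
      let rest' := rest.dropWhile (· ∈ altVowels)
      (if run = ['e'] ∧ rest' = [] then run else 'o' :: 'b' :: run) ++ altGo rest'
termination_by l => l.length
decreasing_by
  · simp
  · simp only [List.length_cons]
    exact Nat.lt_succ_of_le (List.length_dropWhile_le _ _)

def to_obenglobish_alt (word : String) : String :=
  String.mk (altGo word.toList)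

-- ===== PRECONDITION & SPEC =====
def Spec_to_obenglobish (word : String) (out : String) : Prop := out = to_obenglobish_alt word
instance (word : String) (out : String) : Decidable (Spec_to_obenglobish word out) := by unfold Spec_to_obenglobish; infer_instance

-- ===== CLAIM (what is proved, stated in full; the proofs are below) =====
def Claim_equal_to_obenglobish : Prop := ∀ (word : String), Dom_to_obenglobish word → Spec_to_obenglobish word (to_obenglobish word)

-- ===== LEMMAS AND PROOFS =====

/-- The piece A appends at index `i` of `cs`. -/
def pieceA (cs : List Char) (i : Int) : List Char :=
  if PySem.List.pyGetD cs i ' ' ∉ altVowels then [PySem.List.pyGetD cs i ' ']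
  else if PySem.List.pyGetD cs (i-1) ' ' ∈ altVowels ∧ PySem.List.pyGetD cs i ' ' ∈ altVowels ∧ i > 0 then
    [PySem.List.pyGetD cs i ' ']
  else if i + 1 = (cs.length : Int) ∧ PySem.List.pyGetD cs i ' ' = 'e' then [PySem.List.pyGetD cs i ' ']
  else ['o', 'b', PySem.List.pyGetD cs i ' ']

/-- "was the previous character a vowel": derived from the prefix already consumed. -/
def pvOf (pre : List Char) : Bool :=
  match pre.getLast? with
  | some p => decide (p ∈ altVowels)
  | none => false

/-- What either program emits for one character, given whether the previous character
    was a vowel and whether this is the last character. -/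
def obPiece (pv islast : Bool) (c : Char) : List Char :=
  if c ∉ altVowels then [c]
  else if pv then [c]
  else if islast = true ∧ c = 'e' then [c]
  else ['o', 'b', c]

/-- Common per-character recursion both ports are reduced to. -/
def g : Bool → List Char → List Char
  | _, [] => []
  | pv, c :: rest => obPiece pv (decide (rest = [])) c ++ g (decide (c ∈ altVowels)) rest

theorem pieceA_eq (pre : List Char) (c : Char) (rest : List Char) :
    pieceA (pre ++ c :: rest) (pre.length : Int) = obPiece (pvOf pre) (decide (rest = [])) c := by
  have hget : PySem.List.pyGetD (pre ++ c :: rest) (pre.length : Int) ' ' = c := by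
    rw [PySem.List.pyGetD_natCast]
    simp [List.getD_eq_getElem?_getD, List.getElem?_append_right (Nat.le_refl pre.length)]
  have h3 : ((pre.length : Int) + 1 = ((pre ++ c :: rest).length : Int)) ↔ rest = [] := by
    simp only [List.length_append, List.length_cons]
    push_cast
    constructor
    · intro h
      exact List.eq_nil_of_length_eq_zero (by omega)
    · intro h; subst h; simp
  cases pre with
  | nil =>
    simp only [List.nil_append, List.length_nil, Nat.cast_zero] at hget h3 ⊢
    unfold pieceA obPiece pvOf
    simp only [List.nil_append, hget]
    split_ifs <;> simp_all
  | cons p pre' =>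
    have hne : (p :: pre') ≠ ([] : List Char) := by simp
    have hidx : ((p :: pre').length : Int) - 1 = (((p :: pre').length - 1 : Nat) : Int) := by
      simp only [List.length_cons]; push_cast; ring
    have hprev : PySem.List.pyGetD ((p :: pre') ++ c :: rest) (((p :: pre').length : Int) - 1) ' '
        = (p :: pre').getLast hne := by
      rw [hidx, PySem.List.pyGetD_natCast]
      rw [List.getD_eq_getElem?_getD]
      rw [List.getElem?_append_left (by simp)]
      rw [List.getLast_eq_getElem]
      simp only [List.length_cons, Nat.add_sub_cancel]
      rw [List.getElem?_eq_getElem (by simp)]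
      exact rfl
    have hpv : pvOf (p :: pre') = decide ((p :: pre').getLast hne ∈ altVowels) := by
      unfold pvOf
      rw [List.getLast?_eq_getLast hne]
    have hpos : ((p :: pre').length : Int) > 0 := by
      simp only [List.length_cons]; push_cast; omega
    unfold pieceA obPiece
    rw [hget, hprev, hpv]
    split_ifs <;> simp_all

theorem flat_eq_g : ∀ (tail pre : List Char),
    (PySem.List.pyRange (pre.length : Int) (((pre.length + tail.length : Nat)) : Int) 1).flatMap
      (pieceA (pre ++ tail)) = g (pvOf pre) tail := by
  intro tail
  induction tail with
  | nil =>
    intro pre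
    rw [show ((pre.length + ([] : List Char).length : Nat) : Int) = (pre.length : Int) by simp]
    rw [PySem.List.pyRange_one_eq_nil le_rfl]
    simp [g]
  | cons c rest ih =>
    intro pre
    have hlt : (pre.length : Int) < ((pre.length + (c :: rest).length : Nat) : Int) := by
      simp only [List.length_cons]; push_cast; omega
    rw [PySem.List.pyRange_one_cons hlt, List.flatMap_cons]
    have h2 := ih (pre ++ [c])
    have e1 : (((pre ++ [c]).length : Nat) : Int) = (pre.length : Int) + 1 := by simp
    have e2 : (((pre ++ [c]).length + rest.length : Nat) : Int)
        = ((pre.length + (c :: rest).length : Nat) : Int) := by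
      simp only [List.length_append, List.length_cons, List.length_nil]; push_cast; omega
    have e3 : (pre ++ [c]) ++ rest = pre ++ c :: rest := by simp
    have e4 : pvOf (pre ++ [c]) = decide (c ∈ altVowels) := by
      simp [pvOf]
    rw [e1, e2, e3, e4] at h2
    rw [h2]
    conv_rhs => rw [g]
    rw [pieceA_eq]

theorem g_run : ∀ (vs rest : List Char), (∀ x ∈ vs, x ∈ altVowels) →
    (∀ d, rest.head? = some d → d ∉ altVowels) →
    g true (vs ++ rest) = vs ++ g false rest := by
  intro vs
  induction vs with
  | nil =>
    intro rest _ hr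
    cases rest with
    | nil => simp [g]
    | cons d r =>
      have hd : d ∉ altVowels := hr d rfl
      simp [g, obPiece, hd]
  | cons v vs ih =>
    intro rest hv hr
    have hvV : v ∈ altVowels := hv v (by simp)
    have ih' := ih rest (fun x hx => hv x (by simp [hx])) hr
    simp [g, obPiece, hvV, ih']

theorem altGo_eq_g : ∀ l, altGo l = g false l := by
  intro l
  induction l using altGo.induct with
  | case1 => simp [altGo, g]
  | case2 c rest h ih =>
    simp [altGo, g, obPiece, h, ih]
  | case3 c rest h rest' ih =>
    have hc : c ∈ altVowels := not_not.mp h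
    rw [altGo]
    simp only [if_neg (not_not.mpr hc)]
    have hrest : rest.takeWhile (· ∈ altVowels) ++ rest.dropWhile (· ∈ altVowels) = rest :=
      List.takeWhile_append_dropWhile
    have hvs : ∀ x ∈ rest.takeWhile (· ∈ altVowels), x ∈ altVowels := by
      intro x hx
      have := List.mem_takeWhile_imp hx
      simpa using this
    have hhd : ∀ d, (rest.dropWhile (· ∈ altVowels)).head? = some d → d ∉ altVowels := by
      intro d hd
      have hne : rest.dropWhile (· ∈ altVowels) ≠ [] := by
        intro hcon; rw [hcon] at hd; simp at hd
      have hnp := List.head_dropWhile_not (p := fun x => decide (x ∈ altVowels)) hne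
      have hdh : (rest.dropWhile (· ∈ altVowels)).head hne = d := by
        rw [← Option.some_inj, ← List.head?_eq_some_head]; exact hd
      simpa [hdh] using hnp
    have hgr : g true rest = rest.takeWhile (· ∈ altVowels) ++ g false (rest.dropWhile (· ∈ altVowels)) := by
      conv_lhs => rw [← hrest]
      exact g_run _ _ hvs hhd
    by_cases hre : rest = []
    · subst hre
      by_cases hce : c = 'e' <;> simp [g, obPiece, hc, hce, altGo]
    · have hcond : ¬(c :: rest.takeWhile (· ∈ altVowels) = ['e'] ∧ rest.dropWhile (· ∈ altVowels) = []) := by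
        rintro ⟨h1, h2⟩
        have : rest.takeWhile (· ∈ altVowels) = [] := (List.cons_eq_cons.mp h1).2
        rw [this] at hrest
        exact hre (by rw [← hrest, h2]; rfl)
      rw [if_neg hcond]
      have ih2 : altGo (rest.dropWhile (· ∈ altVowels)) = g false (rest.dropWhile (· ∈ altVowels)) := ih
      rw [ih2]
      conv_rhs => rw [g]
      rw [show decide (c ∈ altVowels) = true by simp [hc], hgr]
      simp [obPiece, hc, hre]

theorem A_eq_g (cs : List Char) :
    (PySem.List.pyRange 0 (cs.length : Int) 1).foldl (fun new_word i =>
      if PySem.List.pyGetD cs i ' ' ∉ ['a','e','i','o','u'] then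
        new_word ++ [PySem.List.pyGetD cs i ' ']
      else if PySem.List.pyGetD cs (i-1) ' ' ∈ ['a','e','i','o','u'] ∧ PySem.List.pyGetD cs i ' ' ∈ ['a','e','i','o','u'] ∧ i > 0 then
        new_word ++ [PySem.List.pyGetD cs i ' ']
      else if i + 1 = (cs.length : Int) ∧ PySem.List.pyGetD cs i ' ' = 'e' then
        new_word ++ [PySem.List.pyGetD cs i ' ']
      else
        new_word ++ ['o', 'b', PySem.List.pyGetD cs i ' ']) [] = g false cs := by
  have h1 : ((['a','e','i','o','u'] : List Char)) = altVowels := rfl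
  rw [h1]
  have hb : ∀ (acc : List Char) (i : Int), i ∈ PySem.List.pyRange 0 (cs.length : Int) 1 →
      (if PySem.List.pyGetD cs i ' ' ∉ altVowels then acc ++ [PySem.List.pyGetD cs i ' ']
       else if PySem.List.pyGetD cs (i-1) ' ' ∈ altVowels ∧ PySem.List.pyGetD cs i ' ' ∈ altVowels ∧ i > 0 then
         acc ++ [PySem.List.pyGetD cs i ' ']
       else if i + 1 = (cs.length : Int) ∧ PySem.List.pyGetD cs i ' ' = 'e' then
         acc ++ [PySem.List.pyGetD cs i ' ']
       else acc ++ ['o', 'b', PySem.List.pyGetD cs i ' ']) = acc ++ pieceA cs i := by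
    intro acc i _
    unfold pieceA
    split_ifs <;> rfl
  rw [PySem.List.foldl_congr_mem _ _ (fun acc i => acc ++ pieceA cs i) _ hb,
      PySem.List.foldl_append_eq_flatMap]
  have := flat_eq_g cs []
  simpa using this

-- ===== VERDICT (by name: the statement is the Claim_ definition above) =====
theorem to_obenglobish_spec : Claim_equal_to_obenglobish := by
  intro word _
  show to_obenglobish word = to_obenglobish_alt word
  unfold to_obenglobish to_obenglobish_alt
  dsimp only
  rw [A_eq_g, altGo_eq_g]
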